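-- pv_equiv track=rewrite | github.com/dkawczynska/Winter_mountain_hikes | Winter_mountain_hikes.py | bfs
-- ===== SOURCE A (Python) =====
-- from collections import deque
--
-- def bfs(graph, start_node, max_height):
--     # List of visited nodes
--     visited = [False for i in range(0, len(graph))]
--
--     # Queue necessary for graph traversal algorithm
--     queue = deque()
--
--     # Adding the first element to the queue
--     queue.append(start_node)
--     # The first element is already visited
--     visited[start_node] = True
--
--     while queue:
--         node = queue.pop()
--         for neighbour in graph[node]:
--           if neighbour[1] <= max_height and visited[neighbour[0]] is False:
--             visited[neighbour[0]] = True
--             queue.append(neighbour[0])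
--
--     return visited
-- ===== SOURCE B (Python) =====
-- def bfs(graph, start_node, max_height):
--     # Level-synchronous traversal: process whole frontier generations with
--     # plain lists instead of A's one-node-at-a-time LIFO deque.
--     visited = [False] * len(graph)
--     visited[start_node] = True
--     frontier = [start_node]
--     while frontier:
--         next_frontier = []
--         for node in frontier:
--             for neighbour in graph[node]:
--                 if neighbour[1] <= max_height and not visited[neighbour[0]]:
--                     visited[neighbour[0]] = True
--                     next_frontier.append(neighbour[0])
--         frontier = next_frontier
--     return visited
-- ===== Notes on version B (the rewrite author's own statement) =====
-- stated objective: alternative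
-- what changed: A pops one node at a time from the right of a deque (LIFO stack traversal); B does a level-synchronous traversal that expands the whole frontier list into a next-frontier list each round, with no deque and no per-node pop - the final visited array is the same reachable set. Pre_ holds exactly when A returns: the start id is indexable and some set of node ids containing the start is closed under height-admissible edges with every such edge in range (the reachable set is one); on every other input both A and B raise IndexError at an out-of-range id the traversal reaches.
import Mathlib
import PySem

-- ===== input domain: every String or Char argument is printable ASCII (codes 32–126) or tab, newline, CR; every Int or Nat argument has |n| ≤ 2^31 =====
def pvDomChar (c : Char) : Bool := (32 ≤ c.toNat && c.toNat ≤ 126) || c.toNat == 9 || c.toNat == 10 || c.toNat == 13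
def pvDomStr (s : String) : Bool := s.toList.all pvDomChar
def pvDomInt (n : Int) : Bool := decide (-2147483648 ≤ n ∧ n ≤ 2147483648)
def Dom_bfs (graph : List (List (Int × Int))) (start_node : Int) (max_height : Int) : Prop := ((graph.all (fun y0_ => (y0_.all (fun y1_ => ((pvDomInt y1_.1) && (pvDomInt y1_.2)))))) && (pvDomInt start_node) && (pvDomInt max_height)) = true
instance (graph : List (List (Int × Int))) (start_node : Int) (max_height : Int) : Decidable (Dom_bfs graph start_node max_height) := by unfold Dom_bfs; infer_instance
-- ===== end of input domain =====

-- B replaces A's one-node-at-a-time LIFO deque traversal by a level-synchronous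
-- frontier traversal; only the returned visited array (the reachable set) is claimed equal.

-- ===== PORT A =====
-- inner loop body, identical line for line in both Pythons:
--   'if neighbour[1] <= max_height and visited[neighbour[0]] is False:
--        visited[neighbour[0]] = True ; <worklist>.append(neighbour[0])'
def nbStep (max_height : Int) (vq : List Bool × List Int) (nb : Int × Int) :
    List Bool × List Int :=
  if nb.2 ≤ max_height ∧ PySem.List.pyGet? vq.1 nb.1 = some false then
    (PySem.List.pySetD vq.1 nb.1 true, vq.2 ++ [nb.1])
  else vq

-- 'while queue: node = queue.pop(); for neighbour in graph[node]: …'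
-- (deque.pop() pops from the RIGHT).  fuel = len(graph)+1 iterations always suffice
-- under Pre_ (each iteration pops one element, each push flips one False entry);
-- the fuel-0 and graph[node]-out-of-range branches are totality guards only
-- (under Pre_ every popped node is indexable, as in Python).
def bfsLoopA (graph : List (List (Int × Int))) (max_height : Int) :
    Nat → List Bool → List Int → List Bool
  | 0, visited, _ => visited
  | fuel + 1, visited, queue =>
    match queue.getLast? with
    | none => visited
    | some node =>
      match PySem.List.pyGet? graph node with
      | none => visited
      | some l =>
        let vq := l.foldl (nbStep max_height) (visited, queue.dropLast)
        bfsLoopA graph max_height fuel vq.1 vq.2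

def bfs (graph : List (List (Int × Int))) (start_node : Int) (max_height : Int) : List Bool :=
  -- visited = [False for i in range(0, len(graph))]
  let visited := (PySem.List.pyRange 0 (graph.length : Int) 1).map (fun _ => false)
  -- queue.append(start_node); visited[start_node] = True
  let visited := PySem.List.pySetD visited start_node true
  bfsLoopA graph max_height (graph.length + 1) visited [start_node]

-- ===== PORT B =====
-- 'for neighbour in graph[node]: …' for one frontier node
def nodeStep (graph : List (List (Int × Int))) (max_height : Int)
    (vn : List Bool × List Int) (node : Int) : List Bool × List Int :=
  match PySem.List.pyGet? graph node with
  | none => vn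
  | some l => l.foldl (nbStep max_height) vn

-- 'while frontier: next_frontier = []; for node in frontier: …; frontier = next_frontier'
-- fuel = len(graph)+2 rounds always suffice under Pre_ (every nonempty next frontier
-- flips at least one False entry); the fuel-0 branch is a totality guard only.
def bfsLoopB (graph : List (List (Int × Int))) (max_height : Int) :
    Nat → List Bool → List Int → List Bool
  | 0, visited, _ => visited
  | fuel + 1, visited, frontier =>
    match frontier with
    | [] => visited
    | _ :: _ =>
      let vn := frontier.foldl (nodeStep graph max_height) (visited, ([] : List Int))
      bfsLoopB graph max_height fuel vn.1 vn.2

def bfs_alt (graph : List (List (Int × Int))) (start_node : Int) (max_height : Int) : List Bool :=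
  -- visited = [False] * len(graph); visited[start_node] = True; frontier = [start_node]
  let visited := List.replicate graph.length false
  let visited := PySem.List.pySetD visited start_node true
  bfsLoopB graph max_height (graph.length + 2) visited [start_node]

-- ===== PRECONDITION & SPEC =====
-- the Nat index Python's xs[i] denotes for an in-range (possibly negative) i
def pyIdxN (n : Nat) (i : Int) : Nat := if 0 ≤ i then i.toNat else n - (-i).toNat

-- Pre_bfs holds EXACTLY when Python's A returns: the start id is indexable, and some set
-- of node indices containing the start is closed under height-admissible edges with every
-- such edge in range (the set of reachable nodes is such a set, and conversely inside such
-- a set the traversal never meets an out-of-range id).  On every other input A raises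
-- IndexError at an out-of-range id the traversal reaches — and so does B.  The first
-- disjunct ('every admissible edge of the whole graph is in range') is the common special
-- case, stated separately only so the condition is cheap to check on globally safe graphs.
def Pre_bfs (graph : List (List (Int × Int))) (start_node : Int) (max_height : Int) : Prop :=
  (-(graph.length : Int) ≤ start_node ∧ start_node < (graph.length : Int)) ∧
    ((∀ l ∈ graph, ∀ p ∈ l, p.2 ≤ max_height →
        (-(graph.length : Int) ≤ p.1 ∧ p.1 < (graph.length : Int))) ∨
      ∃ S ∈ (Finset.range graph.length).powerset,
        pyIdxN graph.length start_node ∈ S ∧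
        ∀ k ∈ S, ∀ p ∈ graph.getD k [], p.2 ≤ max_height →
          (-(graph.length : Int) ≤ p.1 ∧ p.1 < (graph.length : Int)) ∧
            pyIdxN graph.length p.1 ∈ S)
instance (graph : List (List (Int × Int))) (start_node : Int) (max_height : Int) : Decidable (Pre_bfs graph start_node max_height) := by unfold Pre_bfs; infer_instance

def pvWitness_bfs : (List (List (Int × Int))) × Int × Int := ([[(1, 0), (2, 9)], [(-3, 1)], []], 0, 3)

def Spec_bfs (graph : List (List (Int × Int))) (start_node : Int) (max_height : Int) (out : List Bool) : Prop := out = bfs_alt graph start_node max_height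
instance (graph : List (List (Int × Int))) (start_node : Int) (max_height : Int) (out : List Bool) : Decidable (Spec_bfs graph start_node max_height out) := by unfold Spec_bfs; infer_instance

-- ===== CLAIM (what is proved, stated in full; the proofs are below) =====
def Claim_equal_bfs : Prop := ∀ (graph : List (List (Int × Int))) (start_node : Int) (max_height : Int), Dom_bfs graph start_node max_height → Pre_bfs graph start_node max_height → Spec_bfs graph start_node max_height (bfs graph start_node max_height)

-- ===== LEMMAS AND PROOFS =====

lemma pyIdx?_inr (n : Nat) (i : Int) (h : PySem.Raise.InRange n i) :
    PySem.List.pyIdx? n i = some (pyIdxN n i) := by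
  obtain ⟨h1, h2⟩ := h
  unfold PySem.List.pyIdx? pyIdxN
  split_ifs <;> rfl

lemma pyIdxN_lt (n : Nat) (i : Int) (h : PySem.Raise.InRange n i) : pyIdxN n i < n := by
  obtain ⟨h1, h2⟩ := h
  unfold pyIdxN
  split_ifs <;> omega

lemma inr_of_pyGet?_some {α : Type} (xs : List α) (i : Int) (a : α)
    (h : PySem.List.pyGet? xs i = some a) : PySem.Raise.InRange xs.length i := by
  by_contra hn
  rw [(PySem.List.pyGet?_eq_none_iff xs i).2 hn] at h
  simp at h

lemma pyGet?_inr_get {α : Type} (xs : List α) (i : Int) (h : PySem.Raise.InRange xs.length i) :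
    PySem.List.pyGet? xs i = some (xs[pyIdxN xs.length i]'(pyIdxN_lt _ _ h)) := by
  unfold PySem.List.pyGet?
  rw [pyIdx?_inr _ _ h]
  simp [List.getElem?_eq_getElem (pyIdxN_lt _ _ h)]

lemma pyGet?_getD_bool (xs : List Bool) (n : Nat) (i : Int) (hn : xs.length = n)
    (h : PySem.Raise.InRange n i) :
    PySem.List.pyGet? xs i = some (xs.getD (pyIdxN n i) false) := by
  subst hn
  rw [pyGet?_inr_get xs i h, List.getD_eq_getElem?_getD,
    List.getElem?_eq_getElem (pyIdxN_lt _ _ h)]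
  rfl

lemma pySetD_inr {α : Type} (xs : List α) (n : Nat) (i : Int) (v : α) (hn : xs.length = n)
    (h : PySem.Raise.InRange n i) :
    PySem.List.pySetD xs i v = xs.set (pyIdxN n i) v := by
  subst hn
  unfold PySem.List.pySetD PySem.List.pySet?
  rw [pyIdx?_inr _ _ h]
  rfl

-- a set of node indices that is closed under admissible edges, all of them in range
def SafeSet (graph : List (List (Int × Int))) (max_height : Int) (S : Finset Nat) : Prop :=
  ∀ k ∈ S, ∀ p ∈ graph.getD k [], p.2 ≤ max_height →
    PySem.Raise.InRange graph.length p.1 ∧ pyIdxN graph.length p.1 ∈ S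

-- an edge k → j usable under the height limit (indices already normalised)
def EdgeOK (graph : List (List (Int × Int))) (max_height : Int) (k j : Nat) : Prop :=
  ∃ l v h, graph[k]? = some l ∧ (v, h) ∈ l ∧ h ≤ max_height ∧
    PySem.Raise.InRange graph.length v ∧ pyIdxN graph.length v = j

-- nodes reachable from s along usable edges
inductive ReachN (graph : List (List (Int × Int))) (max_height : Int) (s : Nat) : Nat → Prop
  | base : ReachN graph max_height s s
  | step {k j : Nat} : ReachN graph max_height s k → EdgeOK graph max_height k j →
      ReachN graph max_height s j

lemma pre_safe (graph : List (List (Int × Int))) (start_node max_height : Int)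
    (hpre : Pre_bfs graph start_node max_height) :
    PySem.Raise.InRange graph.length start_node ∧
      ∃ S : Finset Nat, pyIdxN graph.length start_node ∈ S ∧
        SafeSet graph max_height S := by
  obtain ⟨hinr, hcase⟩ := hpre
  refine ⟨hinr, ?_⟩
  rcases hcase with hall | ⟨S, _, hs, hcl⟩
  · refine ⟨Finset.range graph.length, Finset.mem_range.2 (pyIdxN_lt _ _ hinr), ?_⟩
    intro k hk p hp hple
    have hkn : k < graph.length := Finset.mem_range.1 hk
    rw [List.getD_eq_getElem?_getD, List.getElem?_eq_getElem hkn] at hp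
    have h1 := hall _ (List.getElem_mem hkn) p hp hple
    exact ⟨h1, Finset.mem_range.2 (pyIdxN_lt _ _ h1)⟩
  · exact ⟨S, hs, hcl⟩

lemma getD_replicate_false (n k : Nat) : (List.replicate n false).getD k false = false := by
  rw [List.getD_eq_getElem?_getD, List.getElem?_replicate]
  split <;> rfl

lemma getD_set_bool (xs : List Bool) (m j : Nat) (b : Bool) (h : m < xs.length) :
    (xs.set m b).getD j false = if j = m then b else xs.getD j false := by
  rw [List.getD_eq_getElem?_getD, List.getD_eq_getElem?_getD, List.getElem?_set]
  rcases eq_or_ne m j with rfl | hne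
  · simp [h]
  · simp [hne, Ne.symm hne]

lemma count_false_set (xs : List Bool) (m : Nat) (h : m < xs.length)
    (hx : xs.getD m false = false) : (xs.set m true).count false + 1 = xs.count false := by
  induction xs generalizing m with
  | nil => simp at h
  | cons x xs ih =>
    cases m with
    | zero => simp_all
    | succ m =>
      simp only [List.length_cons] at h
      simp only [List.getD_cons_succ] at hx
      have := ih m (by omega) hx
      simp [List.count_cons]
      omega

lemma count_false_replicate (n : Nat) : (List.replicate n false).count false = n := by
  simp

-- ---------- the shared neighbour fold ----------
lemma nbFold (graph : List (List (Int × Int))) (max_height : Int) (S : Finset Nat) (k : Nat)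
    (l0 : List (Int × Int)) (hl : graph[k]? = some l0)
    (hg0 : ∀ p ∈ l0, p.2 ≤ max_height →
      PySem.Raise.InRange graph.length p.1 ∧ pyIdxN graph.length p.1 ∈ S) :
    ∀ (l : List (Int × Int)), (∀ p ∈ l, p ∈ l0) →
    ∀ (visited : List Bool) (q : List Int), visited.length = graph.length →
    (∀ j, visited.getD j false = true → j ∈ S) →
    (l.foldl (nbStep max_height) (visited, q)).1.length = graph.length ∧
    (∀ j, visited.getD j false = true →
      (l.foldl (nbStep max_height) (visited, q)).1.getD j false = true) ∧
    (∀ u ∈ (l.foldl (nbStep max_height) (visited, q)).2, u ∈ q ∨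
      (PySem.Raise.InRange graph.length u ∧
        (l.foldl (nbStep max_height) (visited, q)).1.getD (pyIdxN graph.length u) false = true ∧
        EdgeOK graph max_height k (pyIdxN graph.length u))) ∧
    (∀ j, (l.foldl (nbStep max_height) (visited, q)).1.getD j false = true →
      visited.getD j false = true ∨
      ((∃ u ∈ (l.foldl (nbStep max_height) (visited, q)).2, pyIdxN graph.length u = j) ∧
        EdgeOK graph max_height k j)) ∧
    (∀ v h, (v, h) ∈ l → h ≤ max_height →
      (l.foldl (nbStep max_height) (visited, q)).1.getD (pyIdxN graph.length v) false = true) ∧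
    ((l.foldl (nbStep max_height) (visited, q)).1.count false +
      (l.foldl (nbStep max_height) (visited, q)).2.length = visited.count false + q.length) ∧
    (∀ u ∈ q, u ∈ (l.foldl (nbStep max_height) (visited, q)).2) ∧
    (∀ j, (l.foldl (nbStep max_height) (visited, q)).1.getD j false = true → j ∈ S) := by
  intro l
  induction l with
  | nil =>
    intro _ visited q hlen hS
    refine ⟨hlen, ?_, ?_, ?_, ?_, ?_, ?_, ?_⟩ <;> simp_all
  | cons nb rest ih =>
    rintro hsub visited q hlen hS
    obtain ⟨v, h⟩ := nb
    simp only [List.foldl_cons]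
    by_cases hc : h ≤ max_height ∧ PySem.List.pyGet? visited v = some false
    · -- the neighbour is cheap and unvisited: mark it and push it
      have hvr : PySem.Raise.InRange graph.length v :=
        hlen ▸ inr_of_pyGet?_some visited v false hc.2
      have hvS : pyIdxN graph.length v ∈ S := (hg0 (v, h) (hsub _ (by simp)) hc.1).2
      have hstep : nbStep max_height (visited, q) (v, h) =
          (visited.set (pyIdxN graph.length v) true, q ++ [v]) := by
        simp only [nbStep, if_pos hc, pySetD_inr visited graph.length v true hlen hvr]
      have hvf : visited.getD (pyIdxN graph.length v) false = false := by
        have := hc.2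
        rw [pyGet?_getD_bool visited graph.length v hlen hvr] at this
        exact Option.some.inj this
      have hlt : pyIdxN graph.length v < visited.length := by
        have := pyIdxN_lt graph.length v hvr; omega
      have hS' : ∀ j, (visited.set (pyIdxN graph.length v) true).getD j false = true → j ∈ S := by
        intro j hj
        rw [getD_set_bool _ _ _ _ hlt] at hj
        split_ifs at hj with he
        · exact he ▸ hvS
        · exact hS j hj
      obtain ⟨H1, H2, H3, H4, H5, H6, H7, H8⟩ :=
        ih (fun p hp => hsub p (by simp [hp])) (visited.set (pyIdxN graph.length v) true)
          (q ++ [v]) (by simp [hlen]) hS'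
      rw [hstep]
      have hEdge : EdgeOK graph max_height k (pyIdxN graph.length v) :=
        ⟨l0, v, h, hl, hsub _ (by simp), hc.1, hvr, rfl⟩
      have hmarked :
          (visited.set (pyIdxN graph.length v) true).getD (pyIdxN graph.length v) false = true := by
        rw [getD_set_bool _ _ _ _ hlt]; simp
      refine ⟨H1, ?_, ?_, ?_, ?_, ?_, ?_, H8⟩
      · intro j hj
        exact H2 j (by rw [getD_set_bool _ _ _ _ hlt]; split_ifs <;> simp_all)
      · intro u hu
        rcases H3 u hu with hq | hgood
        · rcases List.mem_append.1 hq with hq | hq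
          · exact Or.inl hq
          · simp only [List.mem_singleton] at hq
            subst hq
            exact Or.inr ⟨hvr, H2 _ hmarked, hEdge⟩
        · exact Or.inr hgood
      · intro j hj
        rcases H4 j hj with hold | hnew
        · rw [getD_set_bool _ _ _ _ hlt] at hold
          split_ifs at hold with he
          · subst he
            exact Or.inr ⟨⟨v, H7 v (by simp), rfl⟩, hEdge⟩
          · exact Or.inl hold
        · exact Or.inr hnew
      · intro v' h' hmem hle
        rcases List.mem_cons.1 hmem with he | hmem
        · injection he with hv hh
          rw [hv]
          exact H2 _ hmarked
        · exact H5 v' h' hmem hle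
      · have := count_false_set visited (pyIdxN graph.length v) hlt hvf
        rw [H6]; simp; omega
      · intro u hu; exact H7 u (by simp [hu])
    · -- neighbour skipped
      have hstep : nbStep max_height (visited, q) (v, h) = (visited, q) := by
        simp only [nbStep, if_neg hc]
      rw [hstep]
      obtain ⟨H1, H2, H3, H4, H5, H6, H7, H8⟩ :=
        ih (fun p hp => hsub p (by simp [hp])) visited q hlen hS
      refine ⟨H1, H2, H3, H4, ?_, H6, H7, H8⟩
      intro v' h' hmem hle
      rcases List.mem_cons.1 hmem with he | hmem
      · injection he with hv hh
        rw [hh] at hle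
        rw [hv]
        -- not pushed because already visited: the condition's second conjunct failed
        have hvr : PySem.Raise.InRange graph.length v :=
          (hg0 (v, h) (hsub _ (by simp)) hle).1
        have hne : PySem.List.pyGet? visited v ≠ some false := fun hf => hc ⟨hle, hf⟩
        rw [pyGet?_getD_bool visited graph.length v hlen hvr] at hne
        have hvd : visited.getD (pyIdxN graph.length v) false = true := by
          rcases Bool.eq_false_or_eq_true (visited.getD (pyIdxN graph.length v) false) with hb | hb
          · exact hb
          · exact absurd (by rw [hb]) hne
        exact H2 _ hvd
      · exact H5 v' h' hmem hle

-- under SafeSet, a node index in S has an adjacency list whose admissible entries are safe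
lemma safe_adj (graph : List (List (Int × Int))) (max_height : Int) (S : Finset Nat)
    (hsafe : SafeSet graph max_height S) (k : Nat) (hk : k < graph.length) (hkS : k ∈ S) :
    ∀ p ∈ graph[k]'hk, p.2 ≤ max_height →
      PySem.Raise.InRange graph.length p.1 ∧ pyIdxN graph.length p.1 ∈ S := by
  intro p hp hple
  have : p ∈ graph.getD k [] := by
    rw [List.getD_eq_getElem?_getD, List.getElem?_eq_getElem hk]
    exact hp
  exact hsafe k hkS p this hple

-- ---------- A's loop computes a sound, closed superset of its marks ----------
lemma runA (graph : List (List (Int × Int))) (max_height : Int) (S : Finset Nat) (s : Nat)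
    (hsafe : SafeSet graph max_height S) :
    ∀ (fuel : Nat) (visited : List Bool) (queue : List Int),
    visited.length = graph.length →
    (∀ u ∈ queue, PySem.Raise.InRange graph.length u ∧
      visited.getD (pyIdxN graph.length u) false = true) →
    (∀ k, visited.getD k false = true → (∃ u ∈ queue, pyIdxN graph.length u = k) ∨
      (∀ j, EdgeOK graph max_height k j → visited.getD j false = true)) →
    (∀ k, visited.getD k false = true → ReachN graph max_height s k) →
    (∀ k, visited.getD k false = true → k ∈ S) →
    visited.count false + queue.length ≤ fuel →
    (bfsLoopA graph max_height fuel visited queue).length = graph.length ∧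
    (∀ k, visited.getD k false = true →
      (bfsLoopA graph max_height fuel visited queue).getD k false = true) ∧
    (∀ k, (bfsLoopA graph max_height fuel visited queue).getD k false = true →
      ReachN graph max_height s k) ∧
    (∀ k j, (bfsLoopA graph max_height fuel visited queue).getD k false = true →
      EdgeOK graph max_height k j →
      (bfsLoopA graph max_height fuel visited queue).getD j false = true) := by
  intro fuel
  induction fuel with
  | zero =>
    intro visited queue hlen hq hcl hsnd hMS hm
    have : queue = [] := List.length_eq_zero_iff.1 (by omega)
    subst this
    simp only [bfsLoopA]
    exact ⟨hlen, fun k h => h, hsnd, fun k j hk he =>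
      (hcl k hk).resolve_left (by simp) j he⟩
  | succ fuel ih =>
    intro visited queue hlen hq hcl hsnd hMS hm
    rcases hql : queue.getLast? with _ | node
    · have : queue = [] := by simpa using List.getLast?_eq_none_iff.1 hql
      subst this
      simp only [bfsLoopA]
      exact ⟨hlen, fun k h => h, hsnd, fun k j hk he =>
        (hcl k hk).resolve_left (by simp) j he⟩
    · obtain ⟨q', rfl⟩ := List.getLast?_eq_some_iff.1 hql
      have hnode := hq node (by simp)
      have hnget : PySem.List.pyGet? graph node =
          some (graph[pyIdxN graph.length node]'(pyIdxN_lt _ _ hnode.1)) :=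
        pyGet?_inr_get graph node hnode.1
      simp only [bfsLoopA, List.getLast?_concat, hnget, List.dropLast_concat]
      have hl : graph[pyIdxN graph.length node]? =
          some (graph[pyIdxN graph.length node]'(pyIdxN_lt _ _ hnode.1)) :=
        List.getElem?_eq_getElem (pyIdxN_lt _ _ hnode.1)
      have hgl := safe_adj graph max_height S hsafe (pyIdxN graph.length node)
        (pyIdxN_lt _ _ hnode.1) (hMS _ hnode.2)
      obtain ⟨F1, F2, F3, F4, F5, F6, F7, F8⟩ :=
        nbFold graph max_height S (pyIdxN graph.length node) _ hl hgl
          (graph[pyIdxN graph.length node]'(pyIdxN_lt _ _ hnode.1)) (fun p hp => hp)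
          visited q' hlen hMS
      set vq := (graph[pyIdxN graph.length node]'(pyIdxN_lt _ _ hnode.1)).foldl
        (nbStep max_height) (visited, q') with hvq
      have hq' : ∀ u ∈ vq.2, PySem.Raise.InRange graph.length u ∧
          vq.1.getD (pyIdxN graph.length u) false = true := by
        intro u hu
        rcases F3 u hu with hu' | hgood
        · have := hq u (by simp [hu'])
          exact ⟨this.1, F2 _ this.2⟩
        · exact ⟨hgood.1, hgood.2.1⟩
      have hcl' : ∀ k, vq.1.getD k false = true → (∃ u ∈ vq.2, pyIdxN graph.length u = k) ∨
          (∀ j, EdgeOK graph max_height k j → vq.1.getD j false = true) := by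
        intro k hk
        rcases F4 k hk with hold | hnew
        · rcases hcl k hold with ⟨u, hu, hut⟩ | hclosed
          · rcases List.mem_append.1 hu with hu | hu
            · exact Or.inl ⟨u, F7 u hu, hut⟩
            · simp only [List.mem_singleton] at hu; subst hu
              refine Or.inr fun j hj => ?_
              obtain ⟨l, v, h, hl', hmem, hle, hv0, rfl⟩ := hj
              rw [← hut, hl] at hl'
              obtain rfl := Option.some.inj hl'
              exact F5 v h hmem hle
          · exact Or.inr fun j hj => F2 _ (hclosed j hj)
        · exact Or.inl hnew.1
      have hsnd' : ∀ k, vq.1.getD k false = true → ReachN graph max_height s k := by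
        intro k hk
        rcases F4 k hk with hold | hnew
        · exact hsnd k hold
        · exact ReachN.step (hsnd (pyIdxN graph.length node) hnode.2) hnew.2
      have hm' : vq.1.count false + vq.2.length ≤ fuel := by
        have : (q' ++ [node]).length = q'.length + 1 := by simp
        omega
      obtain ⟨G1, G2, G3, G4⟩ := ih vq.1 vq.2 F1 hq' hcl' hsnd' F8 hm'
      exact ⟨G1, fun k hk => G2 k (F2 k hk), G3, G4⟩

-- ---------- B's outer fold over one frontier ----------
lemma outFold (graph : List (List (Int × Int))) (max_height : Int) (S : Finset Nat)
    (hsafe : SafeSet graph max_height S) :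
    ∀ (frontier : List Int) (visited : List Bool) (next : List Int),
    visited.length = graph.length →
    (∀ u ∈ frontier, PySem.Raise.InRange graph.length u ∧ pyIdxN graph.length u ∈ S) →
    (∀ j, visited.getD j false = true → j ∈ S) →
    (frontier.foldl (nodeStep graph max_height) (visited, next)).1.length = graph.length ∧
    (∀ j, visited.getD j false = true →
      (frontier.foldl (nodeStep graph max_height) (visited, next)).1.getD j false = true) ∧
    (∀ u ∈ (frontier.foldl (nodeStep graph max_height) (visited, next)).2, u ∈ next ∨
      (PySem.Raise.InRange graph.length u ∧
        (frontier.foldl (nodeStep graph max_height) (visited, next)).1.getD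
          (pyIdxN graph.length u) false = true ∧
        ∃ f ∈ frontier, EdgeOK graph max_height (pyIdxN graph.length f) (pyIdxN graph.length u))) ∧
    (∀ j, (frontier.foldl (nodeStep graph max_height) (visited, next)).1.getD j false = true →
      visited.getD j false = true ∨
      ((∃ u ∈ (frontier.foldl (nodeStep graph max_height) (visited, next)).2,
          pyIdxN graph.length u = j) ∧
        ∃ f ∈ frontier, EdgeOK graph max_height (pyIdxN graph.length f) j)) ∧
    (∀ f ∈ frontier, ∀ j, EdgeOK graph max_height (pyIdxN graph.length f) j →
      (frontier.foldl (nodeStep graph max_height) (visited, next)).1.getD j false = true) ∧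
    ((frontier.foldl (nodeStep graph max_height) (visited, next)).1.count false +
      (frontier.foldl (nodeStep graph max_height) (visited, next)).2.length =
      visited.count false + next.length) ∧
    (∀ u ∈ next, u ∈ (frontier.foldl (nodeStep graph max_height) (visited, next)).2) ∧
    (∀ j, (frontier.foldl (nodeStep graph max_height) (visited, next)).1.getD j false = true →
      j ∈ S) := by
  intro frontier
  induction frontier with
  | nil =>
    intro visited next hlen _ hS
    refine ⟨hlen, ?_, ?_, ?_, ?_, ?_, ?_, ?_⟩ <;> simp_all
  | cons f rest ih =>
    intro visited next hlen hfr hS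
    have hf := (hfr f (by simp)).1
    have hfget : PySem.List.pyGet? graph f =
        some (graph[pyIdxN graph.length f]'(pyIdxN_lt _ _ hf)) :=
      pyGet?_inr_get graph f hf
    simp only [List.foldl_cons, nodeStep, hfget]
    have hl : graph[pyIdxN graph.length f]? =
        some (graph[pyIdxN graph.length f]'(pyIdxN_lt _ _ hf)) :=
      List.getElem?_eq_getElem (pyIdxN_lt _ _ hf)
    have hgl := safe_adj graph max_height S hsafe (pyIdxN graph.length f)
      (pyIdxN_lt _ _ hf) (hfr f (by simp)).2
    obtain ⟨F1, F2, F3, F4, F5, F6, F7, F8⟩ :=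
      nbFold graph max_height S (pyIdxN graph.length f) _ hl hgl
        (graph[pyIdxN graph.length f]'(pyIdxN_lt _ _ hf)) (fun p hp => hp) visited next hlen hS
    set vq := (graph[pyIdxN graph.length f]'(pyIdxN_lt _ _ hf)).foldl
      (nbStep max_height) (visited, next) with hvq
    obtain ⟨G1, G2, G3, G4, G5, G6, G7, G8⟩ :=
      ih vq.1 vq.2 F1 (fun u hu => hfr u (by simp [hu])) F8
    have heta : (vq.1, vq.2) = vq := rfl
    rw [heta] at G1 G2 G3 G4 G5 G6 G7 G8
    refine ⟨G1, fun j hj => G2 j (F2 j hj), ?_, ?_, ?_, by omega,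
      fun u hu => G7 u (F7 u hu), G8⟩
    · intro u hu
      rcases G3 u hu with hu' | hgood
      · rcases F3 u hu' with hn | hgood'
        · exact Or.inl hn
        · exact Or.inr ⟨hgood'.1, G2 _ hgood'.2.1, f, by simp, hgood'.2.2⟩
      · obtain ⟨h1, h3, f', hf', he⟩ := hgood
        exact Or.inr ⟨h1, h3, f', by simp [hf'], he⟩
    · intro j hj
      rcases G4 j hj with hold | hnew
      · rcases F4 j hold with hold' | hnew'
        · exact Or.inl hold'
        · obtain ⟨⟨u, hu, hut⟩, he⟩ := hnew'
          exact Or.inr ⟨⟨u, G7 u hu, hut⟩, f, by simp, he⟩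
      · obtain ⟨hex, f', hf', he⟩ := hnew
        exact Or.inr ⟨hex, f', by simp [hf'], he⟩
    · intro f' hf' j hj
      rcases List.mem_cons.1 hf' with rfl | hf'
      · obtain ⟨l, v, h, hl', hmem, hle, hv0, rfl⟩ := hj
        rw [hl] at hl'
        obtain rfl := Option.some.inj hl'
        exact G2 _ (F5 v h hmem hle)
      · exact G5 f' hf' j hj

lemma loopB_nil (graph : List (List (Int × Int))) (max_height : Int) (fuel : Nat)
    (visited : List Bool) : bfsLoopB graph max_height fuel visited [] = visited := by
  cases fuel <;> rfl

-- ---------- B's loop ----------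
lemma runB (graph : List (List (Int × Int))) (max_height : Int) (S : Finset Nat) (s : Nat)
    (hsafe : SafeSet graph max_height S) :
    ∀ (fuel : Nat) (visited : List Bool) (frontier : List Int),
    visited.length = graph.length →
    (∀ u ∈ frontier, PySem.Raise.InRange graph.length u ∧
      visited.getD (pyIdxN graph.length u) false = true) →
    (∀ k, visited.getD k false = true → (∃ u ∈ frontier, pyIdxN graph.length u = k) ∨
      (∀ j, EdgeOK graph max_height k j → visited.getD j false = true)) →
    (∀ k, visited.getD k false = true → ReachN graph max_height s k) →
    (∀ k, visited.getD k false = true → k ∈ S) →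
    visited.count false + 1 ≤ fuel →
    (bfsLoopB graph max_height fuel visited frontier).length = graph.length ∧
    (∀ k, visited.getD k false = true →
      (bfsLoopB graph max_height fuel visited frontier).getD k false = true) ∧
    (∀ k, (bfsLoopB graph max_height fuel visited frontier).getD k false = true →
      ReachN graph max_height s k) ∧
    (∀ k j, (bfsLoopB graph max_height fuel visited frontier).getD k false = true →
      EdgeOK graph max_height k j →
      (bfsLoopB graph max_height fuel visited frontier).getD j false = true) := by
  intro fuel
  induction fuel with
  | zero => intro _ _ _ _ _ _ _ hm; omega
  | succ fuel ih =>
    intro visited frontier hlen hfr hcl hsnd hMS hm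
    rcases frontier with _ | ⟨f, rest⟩
    · simp only [bfsLoopB]
      exact ⟨hlen, fun k h => h, hsnd, fun k j hk he =>
        (hcl k hk).resolve_left (by simp) j he⟩
    · simp only [bfsLoopB]
      obtain ⟨F1, F2, F3, F4, F5, F6, F7, F8⟩ :=
        outFold graph max_height S hsafe (f :: rest) visited []
          hlen (fun u hu => ⟨(hfr u hu).1, hMS _ (hfr u hu).2⟩) hMS
      set vn := (f :: rest).foldl (nodeStep graph max_height) (visited, ([] : List Int)) with hvn
      have hcl' : ∀ k, vn.1.getD k false = true → (∃ u ∈ vn.2, pyIdxN graph.length u = k) ∨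
          (∀ j, EdgeOK graph max_height k j → vn.1.getD j false = true) := by
        intro k hk
        rcases F4 k hk with hold | hnew
        · rcases hcl k hold with ⟨u, hu, hut⟩ | hclosed
          · exact Or.inr fun j hj => F5 u hu j (hut ▸ hj)
          · exact Or.inr fun j hj => F2 _ (hclosed j hj)
        · exact Or.inl hnew.1
      have hsnd' : ∀ k, vn.1.getD k false = true → ReachN graph max_height s k := by
        intro k hk
        rcases F4 k hk with hold | hnew
        · exact hsnd k hold
        · obtain ⟨_, f', hf', he⟩ := hnew
          exact ReachN.step (hsnd (pyIdxN graph.length f') (hfr f' hf').2) he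
      have hfr' : ∀ u ∈ vn.2, PySem.Raise.InRange graph.length u ∧
          vn.1.getD (pyIdxN graph.length u) false = true := by
        intro u hu
        rcases F3 u hu with hu' | hgood
        · simp at hu'
        · exact ⟨hgood.1, hgood.2.1⟩
      rcases hvn2 : vn.2 with _ | ⟨u, us⟩
      · -- no new frontier: the loop stops with vn.1, which is already closed
        rw [loopB_nil]
        refine ⟨F1, F2, hsnd', fun k j hk he => ?_⟩
        rcases hcl' k hk with ⟨u, hu, _⟩ | hclosed
        · rw [hvn2] at hu; simp at hu
        · exact hclosed j he
      · have hm' : vn.1.count false + 1 ≤ fuel := by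
          have : vn.2.length = us.length + 1 := by rw [hvn2]; simp
          simp only [List.length_nil] at F6
          omega
        rw [← hvn2]
        obtain ⟨G1, G2, G3, G4⟩ := ih vn.1 vn.2 F1 hfr' hcl' hsnd' F8 hm'
        exact ⟨G1, fun k hk => G2 k (F2 k hk), G3, G4⟩

-- a closed marking containing s contains everything reachable from s
lemma reach_subset (graph : List (List (Int × Int))) (max_height : Int) (s : Nat)
    (R : List Bool) (hs : R.getD s false = true)
    (hclosed : ∀ k j, R.getD k false = true → EdgeOK graph max_height k j →
      R.getD j false = true) :
    ∀ j, ReachN graph max_height s j → R.getD j false = true := by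
  intro j h
  induction h with
  | base => exact hs
  | step _ e ih => exact hclosed _ _ ih e

-- A's initial comprehension is just a replicate
lemma initA_eq (n : Nat) :
    (PySem.List.pyRange 0 (n : Int) 1).map (fun _ => false) = List.replicate n false := by
  rw [PySem.List.pyRange_zero_natCast]
  simp [List.map_map]

-- ===== VERDICT (by name: the statement is the Claim_ definition above) =====
theorem bfs_spec : Claim_equal_bfs := by
  intro graph start_node max_height _ hpre
  obtain ⟨hinr, S, hsS, hsafe⟩ := pre_safe graph start_node max_height hpre
  unfold Spec_bfs
  have hbfsA : bfs graph start_node max_height =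
      bfsLoopA graph max_height (graph.length + 1)
        ((List.replicate graph.length false).set (pyIdxN graph.length start_node) true)
        [start_node] := by
    simp only [bfs, initA_eq,
      pySetD_inr (List.replicate graph.length false) graph.length start_node true (by simp) hinr]
  have hbfsB : bfs_alt graph start_node max_height =
      bfsLoopB graph max_height (graph.length + 2)
        ((List.replicate graph.length false).set (pyIdxN graph.length start_node) true)
        [start_node] := by
    simp only [bfs_alt,
      pySetD_inr (List.replicate graph.length false) graph.length start_node true (by simp) hinr]
  set n := graph.length with hndef
  set s := pyIdxN n start_node with hsdef
  have hsl : s < n := pyIdxN_lt n start_node hinr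
  set V0 := (List.replicate n false).set s true with hV0
  have hV0len : V0.length = n := by simp [hV0]
  have hV0get : ∀ k, V0.getD k false = true ↔ k = s := by
    intro k
    rw [hV0, getD_set_bool _ _ _ _ (by simp [hndef]; omega)]
    split_ifs with h
    · simp [h]
    · rw [getD_replicate_false n k]
      simp [h]
  have hV0count : V0.count false + 1 = n := by
    rw [hV0, count_false_set _ _ (by simp [hndef]; omega) (getD_replicate_false n s)]
    exact count_false_replicate n
  have hqinv : ∀ u ∈ [start_node], PySem.Raise.InRange n u ∧ V0.getD (pyIdxN n u) false = true := by
    intro u hu; simp only [List.mem_singleton] at hu; subst hu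
    exact ⟨hinr, (hV0get s).2 rfl⟩
  have hclinv : ∀ k, V0.getD k false = true → (∃ u ∈ [start_node], pyIdxN n u = k) ∨
      (∀ j, EdgeOK graph max_height k j → V0.getD j false = true) := by
    intro k hk
    exact Or.inl ⟨start_node, by simp, by rw [(hV0get k).1 hk]⟩
  have hsndinv : ∀ k, V0.getD k false = true → ReachN graph max_height s k := by
    intro k hk; rw [(hV0get k).1 hk]; exact ReachN.base
  have hMSinv : ∀ k, V0.getD k false = true → k ∈ S := by
    intro k hk; rw [(hV0get k).1 hk]; exact hsS
  -- run A
  obtain ⟨A1, A2, A3, A4⟩ :=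
    runA graph max_height S s hsafe (n + 1) V0 [start_node] (by omega) hqinv hclinv hsndinv
      hMSinv (by simp; omega)
  -- run B
  obtain ⟨B1, B2, B3, B4⟩ :=
    runB graph max_height S s hsafe (n + 2) V0 [start_node] (by omega) hqinv hclinv hsndinv
      hMSinv (by omega)
  rw [hbfsA, hbfsB]
  set RA := bfsLoopA graph max_height (n + 1) V0 [start_node] with hRA
  set RB := bfsLoopB graph max_height (n + 2) V0 [start_node] with hRB
  have hAiff : ∀ k, RA.getD k false = true ↔ ReachN graph max_height s k := by
    intro k
    exact ⟨A3 k, reach_subset graph max_height s RA (A2 s ((hV0get s).2 rfl)) A4 k⟩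
  have hBiff : ∀ k, RB.getD k false = true ↔ ReachN graph max_height s k := by
    intro k
    exact ⟨B3 k, reach_subset graph max_height s RB (B2 s ((hV0get s).2 rfl)) B4 k⟩
  apply List.ext_getElem (by omega)
  intro i h1 h2
  have hgd : RA.getD i false = RB.getD i false := by
    rcases Bool.eq_false_or_eq_true (RA.getD i false) with ha | ha
    · rw [ha, (hBiff i).2 ((hAiff i).1 ha)]
    · rcases Bool.eq_false_or_eq_true (RB.getD i false) with hb | hb
      · exact absurd ((hAiff i).2 ((hBiff i).1 hb)) (by rw [ha]; exact Bool.false_ne_true)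
      · rw [ha, hb]
  rw [List.getD_eq_getElem?_getD, List.getD_eq_getElem?_getD,
    List.getElem?_eq_getElem h1, List.getElem?_eq_getElem h2] at hgd
  simpa using hgd
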